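-- pv_equiv track=rewrite | github.com/LadyElinor/Noether-Lefschetz-Pilot | nl_quartic_line_sampling.py | conic_contained_xz_minus_y2
-- ===== SOURCE A (Python) =====
-- from typing import Dict, List, Sequence, Tuple
--
-- Exp4 = Tuple[int, int, int, int]
--
-- def conic_contained_xz_minus_y2(coeffs: Dict[Exp4, int]) -> bool:
--     """Check F(s^2, s t, t^2, 0) == 0 as a binary form of degree 8."""
--     poly: Dict[int, int] = {}
--     for (a, b, c, d), c0 in coeffs.items():
--         if c0 == 0 or d != 0:
--             continue
--         sdeg = 2 * a + b
--         poly[sdeg] = poly.get(sdeg, 0) + c0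
--     return all(v == 0 for v in poly.values())
-- ===== SOURCE B (Python) =====
-- def conic_contained_xz_minus_y2(coeffs):
--     """Check F(s^2, s t, t^2, 0) == 0 as a binary form of degree 8."""
--     items = [(2 * a + b, c0) for (a, b, c, d), c0 in coeffs.items() if c0 != 0 and d == 0]
--     degs = {k for k, _ in items}
--     return all(sum(v for k2, v in items if k2 == k) == 0 for k in degs)
-- ===== Notes on version B (the rewrite author's own statement) =====
-- stated objective: alternative
-- what changed: B replaces A's single-pass dict accumulation with a filter-and-project pass producing (degree, coeff) pairs, then checks each distinct degree by summing its coefficients directly, with no mutable accumulator.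
import Mathlib
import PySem

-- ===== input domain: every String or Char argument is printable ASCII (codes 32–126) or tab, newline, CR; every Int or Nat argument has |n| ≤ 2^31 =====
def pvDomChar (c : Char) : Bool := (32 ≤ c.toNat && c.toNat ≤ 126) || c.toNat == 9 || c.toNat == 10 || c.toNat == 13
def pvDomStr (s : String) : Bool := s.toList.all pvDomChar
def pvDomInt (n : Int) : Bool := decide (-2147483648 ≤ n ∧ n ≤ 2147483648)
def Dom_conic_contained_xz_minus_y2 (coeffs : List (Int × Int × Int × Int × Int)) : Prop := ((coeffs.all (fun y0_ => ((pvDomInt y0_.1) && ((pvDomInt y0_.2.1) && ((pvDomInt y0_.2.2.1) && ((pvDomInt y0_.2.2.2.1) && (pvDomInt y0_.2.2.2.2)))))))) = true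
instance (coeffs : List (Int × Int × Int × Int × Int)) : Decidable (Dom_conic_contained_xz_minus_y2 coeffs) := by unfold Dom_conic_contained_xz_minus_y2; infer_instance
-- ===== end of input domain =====

-- ===== PORT A =====
-- A: accumulate coefficients per s-degree in a dict, then check all values are zero.
def conic_contained_xz_minus_y2 (coeffs : List (Int × Int × Int × Int × Int)) : Bool :=
  let poly : PySem.Dict Int Int :=
    coeffs.foldl (fun poly t =>
      if t.2.2.2.2 = 0 ∨ t.2.2.2.1 ≠ 0 then poly
      else poly.insert (2 * t.1 + t.2.1) (poly.getD (2 * t.1 + t.2.1) 0 + t.2.2.2.2))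
      PySem.Dict.empty
  poly.values.all (fun v => v == 0)

-- ===== PORT B =====
-- B: filter to (degree, coeff) pairs; for each distinct degree sum its coefficients directly.
def conic_contained_xz_minus_y2_alt (coeffs : List (Int × Int × Int × Int × Int)) : Bool :=
  let items : List (Int × Int) :=
    (coeffs.filter (fun t => t.2.2.2.2 ≠ 0 && t.2.2.2.1 == 0)).map
      (fun t => (2 * t.1 + t.2.1, t.2.2.2.2))
  let degs : PySem.Set Int := PySem.Set.ofList (items.map Prod.fst)
  degs.all (fun k => ((items.filter (fun p => p.1 == k)).map Prod.snd).sum == 0)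

-- ===== PRECONDITION & SPEC =====
def Spec_conic_contained_xz_minus_y2 (coeffs : List (Int × Int × Int × Int × Int)) (out : Bool) : Prop := out = conic_contained_xz_minus_y2_alt coeffs
instance (coeffs : List (Int × Int × Int × Int × Int)) (out : Bool) : Decidable (Spec_conic_contained_xz_minus_y2 coeffs out) := by unfold Spec_conic_contained_xz_minus_y2; infer_instance

-- ===== CLAIM (what is proved, stated in full; the proofs are below) =====
def Claim_equal_conic_contained_xz_minus_y2 : Prop := ∀ (coeffs : List (Int × Int × Int × Int × Int)), Dom_conic_contained_xz_minus_y2 coeffs → Spec_conic_contained_xz_minus_y2 coeffs (conic_contained_xz_minus_y2 coeffs)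

-- ===== LEMMAS AND PROOFS =====

-- ===== VERDICT (by name: the statement is the Claim_ definition above) =====
-- getD after an accumulate-by-insert loop over (key, value) pairs is the starting value plus the
-- sum of the values carrying that key.
theorem getD_foldl_insert_add (ps : List (Int × Int)) (d : PySem.Dict Int Int) (k : Int) :
    (ps.foldl (fun d p => d.insert p.1 (d.getD p.1 0 + p.2)) d).getD k 0
      = d.getD k 0 + ((ps.filter (fun p => p.1 == k)).map Prod.snd).sum := by
  induction ps generalizing d with
  | nil => simp
  | cons p ps ih =>
    simp only [List.foldl_cons, ih, List.filter_cons]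
    by_cases h : p.1 = k
    · simp [h]
      ring
    · simp [h, PySem.Dict.getD_insert, Ne.symm h]

-- A's loop over coeffs equals the accumulate loop over B's filtered-and-projected pairs.
theorem foldA_eq (coeffs : List (Int × Int × Int × Int × Int)) (d : PySem.Dict Int Int) :
    coeffs.foldl (fun poly t =>
        if t.2.2.2.2 = 0 ∨ t.2.2.2.1 ≠ 0 then poly
        else poly.insert (2 * t.1 + t.2.1) (poly.getD (2 * t.1 + t.2.1) 0 + t.2.2.2.2)) d
      = ((coeffs.filter (fun t => t.2.2.2.2 ≠ 0 && t.2.2.2.1 == 0)).map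
          (fun t => (2 * t.1 + t.2.1, t.2.2.2.2))).foldl
          (fun d p => d.insert p.1 (d.getD p.1 0 + p.2)) d := by
  induction coeffs generalizing d with
  | nil => rfl
  | cons t ts ih =>
    simp only [List.foldl_cons, List.filter_cons]
    by_cases h1 : t.2.2.2.2 = 0 <;> by_cases h2 : t.2.2.2.1 = 0 <;>
      simp [h1, h2, ih]

theorem conic_contained_xz_minus_y2_spec : Claim_equal_conic_contained_xz_minus_y2 := by
  intro coeffs _
  unfold Spec_conic_contained_xz_minus_y2 conic_contained_xz_minus_y2 conic_contained_xz_minus_y2_alt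
  simp only [foldA_eq]
  set items := ((coeffs.filter (fun t => t.2.2.2.2 ≠ 0 && t.2.2.2.1 == 0)).map
      (fun t => (2 * t.1 + t.2.1, t.2.2.2.2))) with hitems
  set D := items.foldl (fun d p => d.insert p.1 (d.getD p.1 0 + p.2)) PySem.Dict.empty with hD
  have hnd : D.keys.Nodup := by
    rw [hD]
    exact PySem.Dict.nodup_keys_foldl_insert_key items Prod.fst _ _ PySem.Dict.nodup_keys_empty
  have hkeys : D.keys = PySem.Set.ofList (items.map Prod.fst) := by
    rw [hD, PySem.Dict.keys_foldl_insert_key]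
    simp [PySem.Set.update, PySem.Set.ofList_eq_foldl, PySem.Dict.keys_empty]
  rw [PySem.Dict.values_eq_map_keys D hnd 0, List.all_map, hkeys]
  congr 1
  funext k
  simp only [Function.comp, hD, getD_foldl_insert_add, PySem.Dict.getD_empty, zero_add]
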